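-- pv_equiv track=rewrite | github.com/enjoyneer87/NVH_py | Jmg_NVH_Export.py | copy_1_electric_cycle_to_1_mechanical_cycle
-- ===== SOURCE A (Python) =====
-- def copy_1_electric_cycle_to_1_mechanical_cycle(useElectricCycle, numPoles, originalData):
-- 	result = []
-- 	if (useElectricCycle):
-- 		for i in range(numPoles//2):
-- 			if (i == 0):
-- 				result.extend(originalData)
-- 			else:
-- 				result.extend(originalData[1:])
-- 	else:
-- 		result = originalData
-- 	return result
-- ===== SOURCE B (Python) =====
-- def copy_1_electric_cycle_to_1_mechanical_cycle(useElectricCycle, numPoles, originalData):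
--     # Compute each output element directly by index arithmetic: output position k
--     # holds originalData[k] inside the first cycle and, past it, the tail element at
--     # offset 1 + (k - m) % (m - 1).  No list copying/extending at all.
--     if not useElectricCycle:
--         return originalData
--     n = numPoles // 2
--     m = len(originalData)
--     if n <= 0:
--         return []
--     total = m + (n - 1) * max(m - 1, 0)
--     return [originalData[k if k < m else 1 + (k - m) % (m - 1)] for k in range(total)]
-- ===== Notes on version B (the rewrite author's own statement) =====
-- stated objective: alternative
-- what changed: Instead of A's loop that repeatedly extends an accumulator with whole copies of the data/tail, B computes the total output length and produces each element directly by index arithmetic (k for k < m, else 1 + (k-m) % (m-1)) in a single comprehension.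
import Mathlib
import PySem

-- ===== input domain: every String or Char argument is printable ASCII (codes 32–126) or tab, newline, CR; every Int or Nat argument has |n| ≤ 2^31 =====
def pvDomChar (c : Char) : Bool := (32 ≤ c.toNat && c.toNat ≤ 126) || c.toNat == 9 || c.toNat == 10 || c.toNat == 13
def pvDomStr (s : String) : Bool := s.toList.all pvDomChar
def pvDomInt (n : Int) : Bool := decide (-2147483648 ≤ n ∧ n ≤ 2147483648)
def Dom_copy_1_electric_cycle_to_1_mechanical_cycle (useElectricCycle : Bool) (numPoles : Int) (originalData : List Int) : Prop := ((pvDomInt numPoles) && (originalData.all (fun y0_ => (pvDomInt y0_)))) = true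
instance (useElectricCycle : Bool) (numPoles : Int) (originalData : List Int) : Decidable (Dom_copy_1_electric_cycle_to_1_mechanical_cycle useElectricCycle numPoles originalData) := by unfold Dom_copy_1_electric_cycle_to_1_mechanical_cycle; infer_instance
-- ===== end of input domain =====

-- B computes every output element directly by index arithmetic (a single comprehension,
-- no list copying/extending); objective: alternative construction, same cost.

-- ===== PORT A =====
-- Literal port of A: accumulate with a loop over range(numPoles//2), extending with
-- originalData on the first iteration and originalData[1:] afterwards.
def copy_1_electric_cycle_to_1_mechanical_cycle (useElectricCycle : Bool) (numPoles : Int) (originalData : List Int) : List Int :=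
  if useElectricCycle then
    (PySem.List.pyRange 0 (PySem.Int.floordiv numPoles 2) 1).foldl
      (fun result i =>
        if i == 0 then result ++ originalData
        else result ++ PySem.List.slice originalData (some 1) none) []
  else originalData

-- ===== PORT B =====
-- Port of B: one comprehension over range(total); element k is originalData indexed by
-- k inside the first cycle and by 1 + (k - m) % (m - 1) past it.  The index is always
-- in range by construction, so `.getD 0` (the unreachable IndexError default) is exact.
def copy_1_electric_cycle_to_1_mechanical_cycle_alt (useElectricCycle : Bool) (numPoles : Int) (originalData : List Int) : List Int :=
  if !useElectricCycle then originalData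
  else
    let n := PySem.Int.floordiv numPoles 2
    let m : Int := (originalData.length : Int)
    if n ≤ 0 then []
    else
      let total := m + (n - 1) * max (m - 1) 0
      (PySem.List.pyRange 0 total 1).map (fun k =>
        (PySem.List.pyGet? originalData
          (if k < m then k else 1 + PySem.Int.mod (k - m) (m - 1))).getD 0)

-- ===== PRECONDITION & SPEC =====
def Spec_copy_1_electric_cycle_to_1_mechanical_cycle (useElectricCycle : Bool) (numPoles : Int) (originalData : List Int) (out : List Int) : Prop := out = copy_1_electric_cycle_to_1_mechanical_cycle_alt useElectricCycle numPoles originalData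
instance (useElectricCycle : Bool) (numPoles : Int) (originalData : List Int) (out : List Int) : Decidable (Spec_copy_1_electric_cycle_to_1_mechanical_cycle useElectricCycle numPoles originalData out) := by unfold Spec_copy_1_electric_cycle_to_1_mechanical_cycle; infer_instance

-- ===== CLAIM (what is proved, stated in full; the proofs are below) =====
def Claim_equal_copy_1_electric_cycle_to_1_mechanical_cycle : Prop := ∀ (useElectricCycle : Bool) (numPoles : Int) (originalData : List Int), Dom_copy_1_electric_cycle_to_1_mechanical_cycle useElectricCycle numPoles originalData → Spec_copy_1_electric_cycle_to_1_mechanical_cycle useElectricCycle numPoles originalData (copy_1_electric_cycle_to_1_mechanical_cycle useElectricCycle numPoles originalData)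

-- ===== LEMMAS AND PROOFS =====

-- A's loop over range(k+1) produces xs followed by k copies of the tail t.
theorem pvLoopA (xs t : List Int) (k : Nat) :
    ((List.range (k + 1)).map (fun j : Nat => (0 : Int) + (j : Int))).foldl
      (fun result i => if i == 0 then result ++ xs else result ++ t) [] =
    xs ++ (List.replicate k t).flatten := by
  induction k with
  | zero => simp
  | succ m ih =>
      rw [List.range_succ, List.map_append, List.foldl_append, ih]
      simp only [List.map_cons, List.map_nil, List.foldl_cons, List.foldl_nil,
        List.replicate_succ', List.flatten_append, List.flatten_cons, List.flatten_nil,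
        List.append_nil, List.append_assoc]
      rw [if_neg (by simp; omega)]

-- Reading a list back off by index.
theorem pvReadBack (xs : List Int) :
    (List.range xs.length).map (fun j => (xs[j]?).getD 0) = xs := by
  apply List.ext_getElem
  · simp
  · intro i h1 h2
    simp at h1
    simp [h1]

-- B's comprehension over range(M + k*(M-1)) is xs followed by k copies of xs.tail.
theorem pvFormB (xs : List Int) (hM : 1 ≤ xs.length) (k : Nat) :
    (PySem.List.pyRange 0 ((xs.length : Int) + (k : Int) * ((xs.length : Int) - 1)) 1).map
      (fun i =>
        (PySem.List.pyGet? xs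
          (if i < (xs.length : Int) then i
           else 1 + PySem.Int.mod (i - (xs.length : Int)) ((xs.length : Int) - 1))).getD 0) =
    xs ++ (List.replicate k xs.tail).flatten := by
  set M : Nat := xs.length with hMdef
  induction k with
  | zero =>
      simp only [Nat.cast_zero, zero_mul, add_zero, List.replicate_zero, List.flatten_nil,
        List.append_nil]
      rw [PySem.List.pyRange_one]
      have h0 : ((M : Int) - 0).toNat = M := by omega
      rw [h0, List.map_map]
      apply List.ext_getElem
      · simp [hMdef]
      · intro i h1 h2
        simp only [List.length_map, List.length_range] at h1
        have hlt : (i : Int) < (M : Int) := by omega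
        simp only [List.getElem_map, List.getElem_range, Function.comp_apply, zero_add]
        rw [if_pos hlt, PySem.List.pyGet?_natCast, List.getElem?_eq_getElem h2]
        rfl
  | succ p ih =>
      have hsplit : PySem.List.pyRange 0 ((M : Int) + ((p : Nat) + 1 : Nat) * ((M : Int) - 1)) 1 =
          PySem.List.pyRange 0 ((M : Int) + (p : Int) * ((M : Int) - 1)) 1 ++
          PySem.List.pyRange ((M : Int) + (p : Int) * ((M : Int) - 1))
            ((M : Int) + ((p : Nat) + 1 : Nat) * ((M : Int) - 1)) 1 := by
        apply PySem.List.pyRange_one_append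
        · push_cast; nlinarith [hM]
        · push_cast; nlinarith [hM]
      rw [hsplit, List.map_append, ih]
      have hblock : (PySem.List.pyRange ((M : Int) + (p : Int) * ((M : Int) - 1))
            ((M : Int) + ((p : Nat) + 1 : Nat) * ((M : Int) - 1)) 1).map
          (fun i =>
            (PySem.List.pyGet? xs
              (if i < (M : Int) then i
               else 1 + PySem.Int.mod (i - (M : Int)) ((M : Int) - 1))).getD 0) = xs.tail := by
        rw [PySem.List.pyRange_one]
        have hlen : (((M : Int) + ((p : Nat) + 1 : Nat) * ((M : Int) - 1)) -
            ((M : Int) + (p : Int) * ((M : Int) - 1))).toNat = M - 1 := by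
          have he : ((M : Int) + ((p : Nat) + 1 : Nat) * ((M : Int) - 1)) -
              ((M : Int) + (p : Int) * ((M : Int) - 1)) = (M : Int) - 1 := by push_cast; ring
          rw [he]; omega
        rw [hlen, List.map_map]
        have htail : xs.tail = (List.range xs.tail.length).map (fun j => (xs.tail[j]?).getD 0) :=
          (pvReadBack xs.tail).symm
        rw [htail, List.length_tail, ← hMdef]
        apply List.map_congr_left
        intro r hr
        simp only [List.mem_range] at hr
        set a : Int := (M : Int) + (p : Int) * ((M : Int) - 1) with ha
        have hge : ¬ (a + (r : Int) < (M : Int)) := by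
          simp only [not_lt, ha]; nlinarith [hM]
        have hMpos : (1 : Int) ≤ (M : Int) - 1 := by omega
        have hmod : PySem.Int.mod ((a + (r : Int)) - (M : Int)) ((M : Int) - 1) = (r : Int) := by
          rw [PySem.Int.mod_eq_emod_of_pos (by omega : (0 : Int) < (M : Int) - 1)]
          have h2 : (a + (r : Int)) - (M : Int) = (r : Int) + ((M : Int) - 1) * (p : Int) := by
            rw [ha]; ring
          rw [h2, Int.add_mul_emod_self_left]
          have hrI : (r : Int) < (M : Int) - 1 := by
            have h4 : ((r : Nat) : Int) < ((M - 1 : Nat) : Int) := by exact_mod_cast hr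
            omega
          exact Int.emod_eq_of_lt (by positivity) hrI
        simp only [Function.comp_apply, if_neg hge, hmod]
        have hidx : (1 : Int) + (r : Int) = ((1 + r : Nat) : Int) := by push_cast; ring
        rw [hidx, PySem.List.pyGet?_natCast]
        congr 1
        rcases xs with _ | ⟨x, t⟩
        · rw [hMdef] at hM; simp at hM
        · rw [show (1 + r) = r + 1 from Nat.add_comm 1 r,
            List.getElem?_cons_succ, List.tail_cons]
      rw [hblock, List.replicate_succ', List.flatten_append]
      simp [List.append_assoc]

-- ===== VERDICT (by name: the statement is the Claim_ definition above) =====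
theorem copy_1_electric_cycle_to_1_mechanical_cycle_spec : Claim_equal_copy_1_electric_cycle_to_1_mechanical_cycle := by
  intro u numPoles xs _
  unfold Spec_copy_1_electric_cycle_to_1_mechanical_cycle
  unfold copy_1_electric_cycle_to_1_mechanical_cycle copy_1_electric_cycle_to_1_mechanical_cycle_alt
  cases u with
  | false => simp
  | true =>
      simp only [Bool.not_true, Bool.false_eq_true, if_false]
      set n : Int := PySem.Int.floordiv numPoles 2 with hn
      by_cases hle : n ≤ 0
      · rw [if_pos hle, PySem.List.pyRange_one]
        have h0 : (n - 0).toNat = 0 := by omega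
        rw [h0]; simp
      · rw [if_neg hle]
        by_cases hx : xs.length = 0
        · -- empty data: both sides are []
          rcases List.eq_nil_of_length_eq_zero hx with rfl
          have htot : ((List.length ([] : List Int) : Int) +
              (n - 1) * max ((List.length ([] : List Int) : Int) - 1) 0) = 0 := by
            simp
          rw [htot, PySem.List.pyRange_one]
          simp only [PySem.List.slice_from_one]
          rw [PySem.List.pyRange_one]
          have h0 : ((0 : Int) - 0).toNat = 0 := by omega
          have hn0 : (n - 0).toNat = ((n - 1).toNat + 1) := by omega
          rw [h0, hn0]
          rw [pvLoopA ([] : List Int) (List.tail ([] : List Int)) (n - 1).toNat]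
          simp
        · have hM : 1 ≤ xs.length := by omega
          have hmax : max ((xs.length : Int) - 1) 0 = (xs.length : Int) - 1 := by
            rw [max_eq_left]; omega
          have hcast : (xs.length : Int) + (n - 1) * max ((xs.length : Int) - 1) 0 =
              (xs.length : Int) + (((n - 1).toNat : Nat) : Int) * ((xs.length : Int) - 1) := by
            rw [hmax]; congr 1; congr 1; omega
          rw [hcast, pvFormB xs hM (n - 1).toNat]
          rw [PySem.List.pyRange_one]
          have hn0 : (n - 0).toNat = ((n - 1).toNat + 1) := by omega
          rw [hn0, PySem.List.slice_from_one]
          exact pvLoopA xs xs.tail (n - 1).toNat
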